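-- pv_equiv track=rewrite | github.com/kappa1312/kappa | src/conflict/merge_engine.py | _extract_imports_ts
-- ===== SOURCE A (Python) =====
-- def _extract_imports_ts(content: str) -> tuple[list[str], str]:
--     """Extract import statements from TypeScript/JavaScript."""
--     lines = content.split("\n")
--     imports = []
--     body_lines = []
--     in_imports = True
--
--     for line in lines:
--         stripped = line.strip()
--
--         if in_imports and (
--             stripped.startswith("import ")
--             or stripped.startswith("export ")
--             and "from" in stripped
--         ):
--             imports.append(line)
--         elif in_imports and stripped and not stripped.startswith("//"):
--             in_imports = False
--             body_lines.append(line)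
--         else:
--             body_lines.append(line)
--
--     return imports, "\n".join(body_lines)
-- ===== SOURCE B (Python) =====
-- def _extract_imports_ts(content: str) -> tuple[list[str], str]:
--     """Extract import statements from TypeScript/JavaScript.
--
--     Boundary decomposition: find the first real code line, then partition the
--     header in front of it into imports vs. non-imports.
--     """
--
--     def is_import(line):
--         s = line.strip()
--         return s.startswith("import ") or (s.startswith("export ") and "from" in s)
--
--     def is_header(line):
--         s = line.strip()
--         return is_import(line) or not s or s.startswith("//")
--
--     lines = content.split("\n")
--     b = next((i for i, l in enumerate(lines) if not is_header(l)), len(lines))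
--     header, rest = lines[:b], lines[b:]
--     imports = [l for l in header if is_import(l)]
--     body_lines = [l for l in header if not is_import(l)] + rest
--     return imports, "\n".join(body_lines)
-- ===== Notes on version B (the rewrite author's own statement) =====
-- stated objective: alternative
-- what changed: Replaces A's single pass with a sticky in_imports flag by a find-the-boundary-then-partition decomposition: compute the index of the first real code line, filter the header prefix into imports vs non-imports, and append the rest to the body.
import Mathlib
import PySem

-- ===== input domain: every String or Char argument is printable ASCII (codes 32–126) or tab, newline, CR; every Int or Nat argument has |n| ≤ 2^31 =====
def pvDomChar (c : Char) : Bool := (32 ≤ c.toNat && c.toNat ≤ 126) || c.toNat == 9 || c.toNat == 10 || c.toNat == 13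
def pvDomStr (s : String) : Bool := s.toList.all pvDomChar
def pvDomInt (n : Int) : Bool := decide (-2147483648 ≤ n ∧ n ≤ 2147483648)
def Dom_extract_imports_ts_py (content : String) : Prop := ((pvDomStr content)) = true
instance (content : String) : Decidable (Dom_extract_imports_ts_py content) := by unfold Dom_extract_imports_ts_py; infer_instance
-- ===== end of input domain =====

-- B replaces A's sticky-flag single pass by a find-boundary-then-partition decomposition (objective: alternative, same cost).

-- ===== PORT A =====
-- A's loop, step for step: state (imports, body_lines, in_imports)
def pvLoopA : List String → List String → List String → Bool → List String × List String
  | [], imports, body, _ => (imports, body)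
  | l :: ls, imports, body, inImp =>
    let s := PySem.Str.strip l
    if inImp && (PySem.Str.startswith s "import " ||
        (PySem.Str.startswith s "export " && PySem.Str.isIn "from" s)) then
      pvLoopA ls (imports ++ [l]) body inImp
    else if inImp && !(s == "") && !(PySem.Str.startswith s "//") then
      pvLoopA ls imports (body ++ [l]) false
    else
      pvLoopA ls imports (body ++ [l]) inImp

def extract_imports_ts_py (content : String) : List String × String :=
  let lines := (PySem.Chars.splitOn content.toList "\n".toList).map String.ofList
  let r := pvLoopA lines [] [] true
  (r.1, PySem.Str.join "\n" r.2)

-- ===== PORT B =====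
def pvIsImport (line : String) : Bool :=
  let s := PySem.Str.strip line
  PySem.Str.startswith s "import " ||
    (PySem.Str.startswith s "export " && PySem.Str.isIn "from" s)

def pvIsHeader (line : String) : Bool :=
  let s := PySem.Str.strip line
  pvIsImport line || s == "" || PySem.Str.startswith s "//"

def extract_imports_ts_py_alt (content : String) : List String × String :=
  let lines := (PySem.Chars.splitOn content.toList "\n".toList).map String.ofList
  let b := lines.findIdx (fun l => ! pvIsHeader l)   -- findIdx = len(lines) when no line matches, like Source B's next(default)
  let header := lines.take b
  let rest := lines.drop b
  (header.filter pvIsImport,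
   PySem.Str.join "\n" (header.filter (fun l => ! pvIsImport l) ++ rest))

-- ===== PRECONDITION & SPEC =====
def Spec_extract_imports_ts_py (content : String) (out : List String × String) : Prop := out = extract_imports_ts_py_alt content
instance (content : String) (out : List String × String) : Decidable (Spec_extract_imports_ts_py content out) := by unfold Spec_extract_imports_ts_py; infer_instance

-- ===== CLAIM (what is proved, stated in full; the proofs are below) =====
def Claim_equal_extract_imports_ts_py : Prop := ∀ (content : String), Dom_extract_imports_ts_py content → Spec_extract_imports_ts_py content (extract_imports_ts_py content)

-- ===== LEMMAS AND PROOFS =====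

-- Once in_imports is False, A appends every remaining line to body_lines.
theorem pvLoopA_false (ls imports body : List String) :
    pvLoopA ls imports body false = (imports, body ++ ls) := by
  induction ls generalizing body with
  | nil => simp [pvLoopA]
  | cons l ls ih => simp [pvLoopA, ih, List.append_assoc]

-- While in_imports is True, A's pass computes B's partition of the header.
theorem pvLoopA_true (ls imports body : List String) :
    pvLoopA ls imports body true =
      (imports ++ (ls.takeWhile pvIsHeader).filter pvIsImport,
       body ++ (ls.takeWhile pvIsHeader).filter (fun l => ! pvIsImport l)
            ++ ls.dropWhile pvIsHeader) := by
  induction ls generalizing imports body with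
  | nil => simp [pvLoopA]
  | cons l ls ih =>
    simp only [pvLoopA]
    by_cases himp : pvIsImport l = true
    · have hh : pvIsHeader l = true := by simp [pvIsHeader, himp]
      rw [if_pos (by simpa [pvIsImport] using himp)]
      rw [ih]
      simp [hh, himp, List.append_assoc]
    · have himpf : pvIsImport l = false := by simpa using himp
      rw [if_neg (by simpa [pvIsImport] using himp)]
      by_cases hh : pvIsHeader l = true
      · -- blank or comment line: else branch, stays in header, goes to body
        have hor : (PySem.Str.strip l == "") = true ∨
            PySem.Str.startswith (PySem.Str.strip l) "//" = true := by
          have h := hh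
          simp only [pvIsHeader, himpf, Bool.false_or, Bool.or_eq_true] at h
          exact h
        rw [if_neg (by rcases hor with h | h <;> simp at h <;> simp [h])]
        rw [ih]
        simp [hh, himp, List.append_assoc]
      · -- first real code line: flag flips, rest goes straight to body
        have hf : pvIsHeader l = false := by simpa using hh
        have h3 : (PySem.Str.strip l == "") = false ∧
            PySem.Str.startswith (PySem.Str.strip l) "//" = false := by
          simp only [pvIsHeader, himpf, Bool.false_or, Bool.or_eq_false_iff] at hf
          exact hf
        rw [if_pos (by obtain ⟨h1, h2⟩ := h3; simp at h1 h2; simp [h1, h2])]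
        rw [pvLoopA_false]
        simp [hf, List.append_assoc]

-- ===== VERDICT (by name: the statement is the Claim_ definition above) =====
theorem extract_imports_ts_py_spec : Claim_equal_extract_imports_ts_py := by
  intro content _
  unfold Spec_extract_imports_ts_py extract_imports_ts_py extract_imports_ts_py_alt
  simp only [pvLoopA_true, List.nil_append,
    ← List.takeWhile_eq_take_findIdx_not, ← List.dropWhile_eq_drop_findIdx_not]
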